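-- pv_equiv track=rewrite | github.com/IorenzoLF/Le_Refuge | Le_refuge/arc_agi_refuge/notebook_kaggle_arc.py | appliquer_remplissage_zone
-- ===== SOURCE A (Python) =====
-- from typing import Dict, List, Any
--
-- def appliquer_remplissage_zone(input_grid: List[List[int]], target_dims: tuple[int, int]) -> List[List[int]]:
--     """Applique le pattern de remplissage de zones"""
--     h, w = target_dims
--     output = [[0 for _ in range(w)] for _ in range(h)]
--
--     # Remplir avec les valeurs non-zéro de l'input
--     for i in range(min(len(input_grid), h)):
--         for j in range(min(len(input_grid[i]), w)):
--             if input_grid[i][j] != 0: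
--                 output[i][j] = input_grid[i][j]
--
--     return output
-- ===== SOURCE B (Python) =====
-- def appliquer_remplissage_zone(input_grid, target_dims):
--     h, w = target_dims
--     rows = []
--     for row in input_grid[:max(h, 0)]:
--         if len(row) >= w:
--             rows.append(row[:max(w, 0)])
--         else:
--             rows.append(row + [0] * (w - len(row)))
--     for _ in range(h - len(rows)):
--         rows.append([0] * w)
--     return rows
-- ===== Notes on version B (the rewrite author's own statement) =====
-- stated objective: alternative
-- what changed: B builds each output row directly by truncating (slice) or zero-padding (concatenation) the input row to width w and then appends the remaining all-zero rows, instead of allocating a full zero matrix cell by cell and overwriting its cells with the non-zero input values by index assignment.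
import Mathlib
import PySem

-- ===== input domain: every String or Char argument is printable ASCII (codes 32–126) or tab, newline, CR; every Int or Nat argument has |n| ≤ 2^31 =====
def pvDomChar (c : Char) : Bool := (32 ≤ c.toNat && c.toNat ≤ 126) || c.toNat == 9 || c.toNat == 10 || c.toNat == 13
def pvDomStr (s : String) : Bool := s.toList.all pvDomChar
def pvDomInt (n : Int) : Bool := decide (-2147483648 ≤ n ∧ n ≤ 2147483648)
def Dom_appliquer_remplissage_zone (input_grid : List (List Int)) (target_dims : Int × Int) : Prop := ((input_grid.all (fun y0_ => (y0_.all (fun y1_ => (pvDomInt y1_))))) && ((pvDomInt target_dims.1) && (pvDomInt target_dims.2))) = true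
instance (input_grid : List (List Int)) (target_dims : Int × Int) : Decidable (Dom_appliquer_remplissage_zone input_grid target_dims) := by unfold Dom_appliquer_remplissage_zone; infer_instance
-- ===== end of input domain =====

-- B builds each output row directly by truncating/zero-padding the input row to width w and
-- appending the remaining zero rows, instead of allocating a zero matrix and overwriting cells in place.


-- ===== PORT A =====
-- literal transliteration: zero matrix, then in-place overwrite of non-zero input cells
def appliquer_remplissage_zone (input_grid : List (List Int)) (target_dims : Int × Int) : List (List Int) :=
  let h := target_dims.1
  let w := target_dims.2
  let output := (PySem.List.pyRange 0 h 1).map (fun _ => (PySem.List.pyRange 0 w 1).map (fun _ => (0 : Int)))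
  (PySem.List.pyRange 0 (min ((input_grid.length : Int)) h) 1).foldl (fun out i =>
    (PySem.List.pyRange 0 (min (((PySem.List.pyGetD input_grid i []).length : Int)) w) 1).foldl (fun out j =>
      if PySem.List.pyGetD (PySem.List.pyGetD input_grid i []) j 0 ≠ 0 then
        PySem.List.pySetD out i
          (PySem.List.pySetD (PySem.List.pyGetD out i []) j
            (PySem.List.pyGetD (PySem.List.pyGetD input_grid i []) j 0))
      else out) out) output

-- ===== PORT B =====
-- literal transliteration of Source B: append one constructed row per i in range(h)
def appliquer_remplissage_zone_alt (input_grid : List (List Int)) (target_dims : Int × Int) : List (List Int) :=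
  let h := target_dims.1
  let w := target_dims.2
  let rows := (PySem.List.slice input_grid none (some (max h 0))).foldl (fun rows row =>
    if (row.length : Int) ≥ w then
      rows ++ [PySem.List.slice row none (some (max w 0))]
    else
      rows ++ [row ++ List.replicate (w - (row.length : Int)).toNat 0]) []
  (PySem.List.pyRange 0 (h - (rows.length : Int)) 1).foldl (fun rows _ =>
    rows ++ [List.replicate w.toNat 0]) rows

-- ===== PRECONDITION & SPEC =====
def Spec_appliquer_remplissage_zone (input_grid : List (List Int)) (target_dims : Int × Int) (out : List (List Int)) : Prop := out = appliquer_remplissage_zone_alt input_grid target_dims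
instance (input_grid : List (List Int)) (target_dims : Int × Int) (out : List (List Int)) : Decidable (Spec_appliquer_remplissage_zone input_grid target_dims out) := by unfold Spec_appliquer_remplissage_zone; infer_instance

-- ===== CLAIM (what is proved, stated in full; the proofs are below) =====
def Claim_equal_appliquer_remplissage_zone : Prop := ∀ (input_grid : List (List Int)) (target_dims : Int × Int), Dom_appliquer_remplissage_zone input_grid target_dims → Spec_appliquer_remplissage_zone input_grid target_dims (appliquer_remplissage_zone input_grid target_dims)

-- ===== LEMMAS AND PROOFS =====

-- the inner-loop body of port A, applied to a single row
def pvRowFold (row : List Int) (js : List Int) (r : List Int) : List Int :=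
  js.foldl (fun r j =>
    if PySem.List.pyGetD row j 0 ≠ 0 then PySem.List.pySetD r j (PySem.List.pyGetD row j 0) else r) r

def pvProcRow (row : List Int) (w : Int) (r : List Int) : List Int :=
  pvRowFold row (PySem.List.pyRange 0 (min ((row.length : Int)) w) 1) r

theorem pvRowFold_length (row js r) : (pvRowFold row js r).length = r.length := by
  induction js generalizing r with
  | nil => rfl
  | cons j js ih =>
    simp only [pvRowFold, List.foldl_cons]
    rw [show (js.foldl _ _) = pvRowFold row js (if PySem.List.pyGetD row j 0 ≠ 0 then PySem.List.pySetD r j (PySem.List.pyGetD row j 0) else r) from rfl]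
    rw [ih]
    split <;> simp [PySem.List.length_pySetD]

theorem pvRowFold_get (row : List Int) (js : List Int) (hnd : js.Nodup) (hpos : ∀ j ∈ js, 0 ≤ j)
    (r : List Int) (k : Nat) (hk : k < r.length) :
    (pvRowFold row js r)[k]? =
      some (if (k : Int) ∈ js ∧ PySem.List.pyGetD row (k : Int) 0 ≠ 0
            then PySem.List.pyGetD row (k : Int) 0 else r[k]) := by
  induction js generalizing r with
  | nil => simp [pvRowFold, List.getElem?_eq_getElem hk]
  | cons j js ih =>
    have hj0 : 0 ≤ j := hpos j (by simp)
    have hnd' : js.Nodup := hnd.of_cons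
    have hpos' : ∀ x ∈ js, 0 ≤ x := fun x hx => hpos x (by simp [hx])
    simp only [pvRowFold, List.foldl_cons]
    by_cases hv : PySem.List.pyGetD row j 0 ≠ 0
    · rw [if_pos hv]
      rw [PySem.List.pySetD_of_nonneg _ _ hj0]
      have hk' : k < (r.set j.toNat (PySem.List.pyGetD row j 0)).length := by simpa using hk
      rw [show (js.foldl _ _) = pvRowFold row js (r.set j.toNat (PySem.List.pyGetD row j 0)) from rfl]
      rw [ih hnd' hpos' _ hk']
      by_cases hkj : (k : Int) = j
      · have hkj' : k = j.toNat := by omega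
        have hknotin : (k : Int) ∉ js := by rw [hkj]; exact (List.nodup_cons.mp hnd).1
        have hcond1 : ¬((k : Int) ∈ js ∧ PySem.List.pyGetD row (k : Int) 0 ≠ 0) :=
          fun h => hknotin h.1
        have hmem : ((k : Int) ∈ j :: js ∧ PySem.List.pyGetD row (k : Int) 0 ≠ 0) :=
          ⟨by simp [hkj], by rw [hkj]; exact hv⟩
        rw [if_neg hcond1, if_pos hmem, hkj]
        simp [hkj'.symm]
      · have hj' : ¬ (j.toNat = k) := by omega
        have hmem : ((k : Int) ∈ j :: js ∧ PySem.List.pyGetD row (k : Int) 0 ≠ 0) ↔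
            ((k : Int) ∈ js ∧ PySem.List.pyGetD row (k : Int) 0 ≠ 0) := by
          simp [List.mem_cons, hkj]
        by_cases hc : (k : Int) ∈ js ∧ PySem.List.pyGetD row (k : Int) 0 ≠ 0
        · rw [if_pos hc, if_pos (hmem.mpr hc)]
        · rw [if_neg hc, if_neg (fun h => hc (hmem.mp h))]
          simp [hj']
    · rw [if_neg hv]
      rw [show (js.foldl _ _) = pvRowFold row js r from rfl]
      rw [ih hnd' hpos' _ hk]
      have heq : ((k : Int) ∈ j :: js ∧ PySem.List.pyGetD row (k : Int) 0 ≠ 0) ↔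
             ((k : Int) ∈ js ∧ PySem.List.pyGetD row (k : Int) 0 ≠ 0) := by
        constructor
        · rintro ⟨hm, hnz⟩
          rcases List.mem_cons.mp hm with h | h
          · exact absurd (h ▸ hnz) (by simpa using hv)
          · exact ⟨h, hnz⟩
        · rintro ⟨hm, hnz⟩; exact ⟨List.mem_cons_of_mem _ hm, hnz⟩
      rw [if_congr heq rfl rfl]

-- the outer-loop body of port A
def pvOuterBody (g : List (List Int)) (w : Int) (out : List (List Int)) (i : Int) : List (List Int) :=
  (PySem.List.pyRange 0 (min (((PySem.List.pyGetD g i []).length : Int)) w) 1).foldl (fun out j =>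
    if PySem.List.pyGetD (PySem.List.pyGetD g i []) j 0 ≠ 0 then
      PySem.List.pySetD out i
        (PySem.List.pySetD (PySem.List.pyGetD out i []) j
          (PySem.List.pyGetD (PySem.List.pyGetD g i []) j 0))
    else out) out

theorem pvInner_eq (row : List Int) (js : List Int) (i : Int)
    (out : List (List Int)) (h0 : 0 ≤ i) (hn : i < (out.length : Int)) :
    js.foldl (fun out j =>
      if PySem.List.pyGetD row j 0 ≠ 0 then
        PySem.List.pySetD out i
          (PySem.List.pySetD (PySem.List.pyGetD out i []) j
            (PySem.List.pyGetD row j 0))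
      else out) out = out.set i.toNat (pvRowFold row js (out.getD i.toNat [])) := by
  have hnn : i.toNat < out.length := by omega
  induction js generalizing out with
  | nil =>
    simp only [List.foldl_nil, pvRowFold]
    rw [List.getD_eq_getElem _ _ hnn]
    exact (List.set_getElem_self ..).symm
  | cons j js ih =>
    simp only [List.foldl_cons, pvRowFold]
    by_cases hv : PySem.List.pyGetD row j 0 ≠ 0
    · simp only [if_pos hv]
      have hget : PySem.List.pyGetD out i [] = out.getD i.toNat [] := by
        rw [PySem.List.pyGetD_eq_getElem _ _ h0 hn, List.getD_eq_getElem _ _ hnn]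
      rw [hget, PySem.List.pySetD_of_nonneg _ _ h0]
      set a := PySem.List.pySetD (out.getD i.toNat []) j (PySem.List.pyGetD row j 0) with ha
      have hn' : i < ((out.set i.toNat a).length : Int) := by simpa using hn
      rw [ih _ hn' (by simpa using hnn)]
      rw [List.set_set]
      congr 1
      rw [List.getD_eq_getElem _ _ (by simpa using hnn), List.getElem_set_self]
      rfl
    · simp only [if_neg hv]
      rw [ih _ hn hnn]
      rfl

theorem pvOuter_get (g : List (List Int)) (w : Int) (is : List Int) (hnd : is.Nodup)
    (out : List (List Int)) (hall : ∀ i ∈ is, 0 ≤ i ∧ i < (out.length : Int))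
    (k : Nat) (hk : k < out.length) :
    (is.foldl (pvOuterBody g w) out)[k]? =
      some (if (k : Int) ∈ is
            then pvProcRow (PySem.List.pyGetD g (k : Int) []) w out[k]
            else out[k]) := by
  induction is generalizing out with
  | nil => simp [List.getElem?_eq_getElem hk]
  | cons i rest ih =>
    obtain ⟨hi0, hilt⟩ := hall i (by simp)
    have hn : i.toNat < out.length := by omega
    have hstep : pvOuterBody g w out i =
        out.set i.toNat (pvProcRow (PySem.List.pyGetD g i []) w (out.getD i.toNat [])) := by
      unfold pvOuterBody pvProcRow
      exact pvInner_eq _ _ _ _ hi0 hilt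
    simp only [List.foldl_cons]
    rw [hstep]
    set a := pvProcRow (PySem.List.pyGetD g i []) w (out.getD i.toNat []) with ha
    have hall' : ∀ x ∈ rest, 0 ≤ x ∧ x < (((out.set i.toNat a).length : Nat) : Int) := by
      intro x hx
      have := hall x (by simp [hx])
      simpa using this
    have hk' : k < (out.set i.toNat a).length := by simpa using hk
    rw [ih hnd.of_cons _ hall' hk']
    congr 1
    by_cases hki : (k : Int) = i
    · have hki' : i.toNat = k := by omega
      have hknotin : (k : Int) ∉ rest := by rw [hki]; exact (List.nodup_cons.mp hnd).1
      have hgd : out.getD i.toNat [] = out[k] := by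
        rw [List.getD_eq_getElem _ _ hn]
        simp [hki']
      have hmem : (k : Int) ∈ i :: rest := List.mem_cons.mpr (Or.inl hki)
      have hset : (out.set i.toNat a)[k]'hk' = a := by
        simp [hki']
      rw [if_neg hknotin, if_pos hmem, hset, ha, hgd]
      try rw [hki]
    · have hki' : i.toNat ≠ k := by omega
      have hset : (out.set i.toNat a)[k]'hk' = out[k] := by
        simp [hki']
      by_cases hm : (k : Int) ∈ rest
      · rw [if_pos hm, if_pos (List.mem_cons.mpr (Or.inr hm)), hset]
      · rw [if_neg hm, if_neg (by simp [List.mem_cons, hki, hm]), hset]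

theorem pvOuterBody_length_all (g : List (List Int)) (w : Int) (out : List (List Int)) (i : Int) :
    (pvOuterBody g w out i).length = out.length := by
  unfold pvOuterBody
  generalize (PySem.List.pyRange 0 (min (((PySem.List.pyGetD g i []).length : Int)) w) 1) = js
  induction js generalizing out with
  | nil => rfl
  | cons j js ih =>
    simp only [List.foldl_cons]
    rw [ih]
    split <;> simp [PySem.List.length_pySetD]

theorem pvOuterFold_length (g : List (List Int)) (w : Int) (is : List Int) (out : List (List Int)) :
    (is.foldl (pvOuterBody g w) out).length = out.length := by
  induction is generalizing out with
  | nil => rfl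
  | cons i rest ih =>
    simp only [List.foldl_cons]
    rw [ih, pvOuterBody_length_all]

theorem pvProc_zero (row : List Int) (w : Int) :
    pvProcRow row w ((PySem.List.pyRange 0 w 1).map (fun _ => (0 : Int))) =
      (PySem.List.pyRange 0 w 1).map (fun j =>
        if j < (row.length : Int) then PySem.List.pyGetD row j 0 else 0) := by
  apply List.ext_getElem
  · unfold pvProcRow
    rw [pvRowFold_length]
    simp
  · intro k h1 h2
    have hk : k < w.toNat := by
      simpa [PySem.List.length_pyRange_one] using h2
    have hzlen : k < ((PySem.List.pyRange 0 w 1).map (fun _ => (0 : Int))).length := by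
      simpa [PySem.List.length_pyRange_one] using hk
    have hchar := pvRowFold_get row (PySem.List.pyRange 0 (min ((row.length : Int)) w) 1)
      (PySem.List.nodup_pyRange_one _ _)
      (fun j hj => ((PySem.List.mem_pyRange_one).mp hj).1)
      ((PySem.List.pyRange 0 w 1).map (fun _ => (0 : Int))) k hzlen
    have h1' : k < (pvRowFold row (PySem.List.pyRange 0 (min ((row.length : Int)) w) 1)
        ((PySem.List.pyRange 0 w 1).map (fun _ => (0 : Int)))).length := h1
    rw [List.getElem?_eq_getElem h1'] at hchar
    have hL := Option.some.inj hchar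
    simp only [pvProcRow]
    rw [hL]
    have hz : ((PySem.List.pyRange 0 w 1).map (fun _ => (0 : Int)))[k]'hzlen = 0 := by
      simp
    have hR : ((PySem.List.pyRange 0 w 1).map (fun j =>
        if j < (row.length : Int) then PySem.List.pyGetD row j 0 else 0))[k]'h2 =
        (if (k : Int) < (row.length : Int) then PySem.List.pyGetD row (k : Int) 0 else 0) := by
      rw [List.getElem_map]
      congr 1 <;> rw [PySem.List.getElem_pyRange_one] <;> simp
    rw [hR, hz]
    have hm : ((k : Int) ∈ PySem.List.pyRange 0 (min ((row.length : Int)) w) 1) ↔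
        ((k : Int) < (row.length : Int)) := by
      rw [PySem.List.mem_pyRange_one]
      omega
    by_cases hlt : (k : Int) < (row.length : Int)
    · rw [if_pos hlt]
      by_cases hv : PySem.List.pyGetD row (k : Int) 0 = 0
      · rw [if_neg (fun hc => hc.2 hv), hv]
      · rw [if_pos ⟨hm.mpr hlt, hv⟩]
    · rw [if_neg hlt, if_neg (fun hc => hlt (hm.mp hc.1))]

theorem pvFoldl_push_if {α β : Type} (p : β → Prop) [DecidablePred p] (f f' : β → α)
    (l : List β) (init : List α) :
    l.foldl (fun acc x => if p x then acc ++ [f x] else acc ++ [f' x]) init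
      = init ++ l.map (fun x => if p x then f x else f' x) := by
  induction l generalizing init with
  | nil => simp
  | cons x l ih =>
    simp only [List.foldl_cons, List.map_cons]
    by_cases hp : p x
    · rw [if_pos hp, ih, if_pos hp]
      simp
    · rw [if_neg hp, ih, if_neg hp]
      simp

theorem pvPad_eq (row : List Int) (w : Int) :
    (if (row.length : Int) ≥ w then PySem.List.slice row none (some (max w 0))
     else row ++ List.replicate (w - (row.length : Int)).toNat 0) =
      (PySem.List.pyRange 0 w 1).map (fun j =>
        if j < (row.length : Int) then PySem.List.pyGetD row j 0 else 0) := by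
  by_cases hge : (row.length : Int) ≥ w
  · rw [if_pos hge, PySem.List.slice_to _ (le_max_right w 0)]
    apply List.ext_getElem
    · simp only [List.length_take, List.length_map, PySem.List.length_pyRange_one]
      omega
    · intro k h1 h2
      have hk : k < w.toNat := by
        simpa [PySem.List.length_pyRange_one] using h2
      have hklen : k < row.length := by
        have := List.length_take_le (max w 0).toNat row
        omega
      rw [List.getElem_take]
      have hR : ((PySem.List.pyRange 0 w 1).map (fun j =>
          if j < (row.length : Int) then PySem.List.pyGetD row j 0 else 0))[k]'h2 =
          (if (k : Int) < (row.length : Int) then PySem.List.pyGetD row (k : Int) 0 else 0) := by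
        rw [List.getElem_map]
        congr 1 <;> rw [PySem.List.getElem_pyRange_one] <;> simp
      rw [hR, if_pos (by omega : (k : Int) < (row.length : Int))]
      rw [PySem.List.pyGetD_eq_getElem _ _ (by omega) (by omega)]
      congr 1
  · rw [if_neg hge]
    apply List.ext_getElem
    · simp only [List.length_append, List.length_replicate, List.length_map,
        PySem.List.length_pyRange_one]
      omega
    · intro k h1 h2
      have hk : k < w.toNat := by
        simpa [PySem.List.length_pyRange_one] using h2
      have hR : ((PySem.List.pyRange 0 w 1).map (fun j =>
          if j < (row.length : Int) then PySem.List.pyGetD row j 0 else 0))[k]'h2 =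
          (if (k : Int) < (row.length : Int) then PySem.List.pyGetD row (k : Int) 0 else 0) := by
        rw [List.getElem_map]
        congr 1 <;> rw [PySem.List.getElem_pyRange_one] <;> simp
      rw [hR]
      by_cases hklen : k < row.length
      · rw [List.getElem_append_left hklen, if_pos (by omega)]
        rw [PySem.List.pyGetD_eq_getElem _ _ (by omega) (by omega)]
        congr 1
      · rw [List.getElem_append_right (by omega), if_neg (by omega)]
        simp

theorem pvAlt_eq (g : List (List Int)) (h w : Int) :
    appliquer_remplissage_zone_alt g (h, w) =
      (PySem.List.pyRange 0 h 1).map (fun i =>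
        if i < (g.length : Int) then
          (PySem.List.pyRange 0 w 1).map (fun j =>
            if j < ((PySem.List.pyGetD g i []).length : Int) then
              PySem.List.pyGetD (PySem.List.pyGetD g i []) j 0
            else 0)
        else List.replicate w.toNat 0) := by
  have hB : appliquer_remplissage_zone_alt g (h, w) =
      (PySem.List.pyRange 0 (h - ((((PySem.List.slice g none (some (max h 0))).foldl (fun rows row =>
          if (row.length : Int) ≥ w then
            rows ++ [PySem.List.slice row none (some (max w 0))]
          else
            rows ++ [row ++ List.replicate (w - (row.length : Int)).toNat 0]) []).length : Nat) : Int)) 1).foldl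
        (fun rows _ => rows ++ [List.replicate w.toNat 0])
        ((PySem.List.slice g none (some (max h 0))).foldl (fun rows row =>
          if (row.length : Int) ≥ w then
            rows ++ [PySem.List.slice row none (some (max w 0))]
          else
            rows ++ [row ++ List.replicate (w - (row.length : Int)).toNat 0]) []) := rfl
  rw [hB, pvFoldl_push_if, PySem.List.foldl_append_singleton_eq_map,
    PySem.List.slice_to _ (le_max_right h 0)]
  simp only [List.nil_append]
  have hpad : (g.take (max h 0).toNat).map (fun row =>
      if (row.length : Int) ≥ w then PySem.List.slice row none (some (max w 0))
      else row ++ List.replicate (w - (row.length : Int)).toNat 0) =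
      (g.take (max h 0).toNat).map (fun row => (PySem.List.pyRange 0 w 1).map (fun j =>
        if j < (row.length : Int) then PySem.List.pyGetD row j 0 else 0)) :=
    List.map_congr_left (fun row _ => pvPad_eq row w)
  rw [hpad]
  have hzmap : ∀ (n : Int) (init : List (List Int)),
      (PySem.List.pyRange 0 n 1).map (fun _ => List.replicate w.toNat (0 : Int)) =
        List.replicate n.toNat (List.replicate w.toNat 0) := by
    intro n _
    rw [List.map_const']
    simp [PySem.List.length_pyRange_one]
  rw [hzmap _ []]
  set L := (g.take (max h 0).toNat).map (fun row => (PySem.List.pyRange 0 w 1).map (fun j =>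
    if j < (row.length : Int) then PySem.List.pyGetD row j 0 else 0)) with hL
  have hLlen : L.length = min (max h 0).toNat g.length := by
    rw [hL]
    simp
  apply List.ext_getElem
  · simp [hLlen, PySem.List.length_pyRange_one]
    omega
  · intro k h1 h2
    have hk : k < h.toNat := by
      simpa [PySem.List.length_pyRange_one] using h2
    have hR : ((PySem.List.pyRange 0 h 1).map (fun i =>
        if i < (g.length : Int) then
          (PySem.List.pyRange 0 w 1).map (fun j =>
            if j < ((PySem.List.pyGetD g i []).length : Int) then
              PySem.List.pyGetD (PySem.List.pyGetD g i []) j 0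
            else 0)
        else List.replicate w.toNat 0))[k]'h2 =
        (if (k : Int) < (g.length : Int) then
          (PySem.List.pyRange 0 w 1).map (fun j =>
            if j < ((PySem.List.pyGetD g (k : Int) []).length : Int) then
              PySem.List.pyGetD (PySem.List.pyGetD g (k : Int) []) j 0
            else 0)
        else List.replicate w.toNat 0) := by
      rw [List.getElem_map]
      congr 1 <;> rw [PySem.List.getElem_pyRange_one] <;> simp
    rw [hR]
    by_cases hkg : k < L.length
    · have hklen : k < g.length := by omega
      have hpg : PySem.List.pyGetD g (k : Int) [] = g[k] := by
        rw [PySem.List.pyGetD_eq_getElem _ _ (by omega) (by omega)]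
        congr 1
      rw [List.getElem_append_left hkg, if_pos (by omega : (k : Int) < (g.length : Int)), hpg]
      simp only [hL, List.getElem_map, List.getElem_take]
    · rw [List.getElem_append_right (by omega)]
      have hkglen : ¬ ((k : Int) < (g.length : Int)) := by omega
      rw [if_neg hkglen]
      exact List.getElem_replicate _

theorem appliquer_remplissage_zone_equiv (input_grid : List (List Int)) (target_dims : Int × Int) :
    appliquer_remplissage_zone input_grid target_dims = appliquer_remplissage_zone_alt input_grid target_dims := by
  obtain ⟨h, w⟩ := target_dims
  have hA : appliquer_remplissage_zone input_grid (h, w) =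
      (PySem.List.pyRange 0 (min ((input_grid.length : Int)) h) 1).foldl (pvOuterBody input_grid w)
        ((PySem.List.pyRange 0 h 1).map (fun _ => (PySem.List.pyRange 0 w 1).map (fun _ => (0 : Int)))) := rfl
  rw [hA, pvAlt_eq input_grid h w]
  apply List.ext_getElem
  · rw [pvOuterFold_length]
    simp
  · intro k h1 h2
    have hkh : k < h.toNat := by
      simpa [PySem.List.length_pyRange_one] using h2
    have hZlen : k < ((PySem.List.pyRange 0 h 1).map
        (fun _ => (PySem.List.pyRange 0 w 1).map (fun _ => (0 : Int)))).length := by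
      simpa [PySem.List.length_pyRange_one] using hkh
    have hall : ∀ i ∈ PySem.List.pyRange 0 (min ((input_grid.length : Int)) h) 1,
        0 ≤ i ∧ i < ((((PySem.List.pyRange 0 h 1).map
          (fun _ => (PySem.List.pyRange 0 w 1).map (fun _ => (0 : Int)))).length : Nat) : Int) := by
      intro i hi
      have := (PySem.List.mem_pyRange_one).mp hi
      constructor
      · exact this.1
      · have hlen : (((PySem.List.pyRange 0 h 1).map
            (fun _ => (PySem.List.pyRange 0 w 1).map (fun _ => (0 : Int)))).length) = h.toNat := by
          simp
        rw [hlen]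
        omega
    have hchar := pvOuter_get input_grid w
      (PySem.List.pyRange 0 (min ((input_grid.length : Int)) h) 1)
      (PySem.List.nodup_pyRange_one _ _)
      ((PySem.List.pyRange 0 h 1).map (fun _ => (PySem.List.pyRange 0 w 1).map (fun _ => (0 : Int))))
      hall k hZlen
    rw [List.getElem?_eq_getElem h1] at hchar
    have hL := Option.some.inj hchar
    rw [hL]
    have hZk : ((PySem.List.pyRange 0 h 1).map
        (fun _ => (PySem.List.pyRange 0 w 1).map (fun _ => (0 : Int))))[k]'hZlen =
        (PySem.List.pyRange 0 w 1).map (fun _ => (0 : Int)) := by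
      simp
    have hR : ((PySem.List.pyRange 0 h 1).map (fun i =>
        if i < (input_grid.length : Int) then
          (PySem.List.pyRange 0 w 1).map (fun j =>
            if j < ((PySem.List.pyGetD input_grid i []).length : Int) then
              PySem.List.pyGetD (PySem.List.pyGetD input_grid i []) j 0
            else 0)
        else List.replicate w.toNat 0))[k]'h2 =
        (if (k : Int) < (input_grid.length : Int) then
          (PySem.List.pyRange 0 w 1).map (fun j =>
            if j < ((PySem.List.pyGetD input_grid (k : Int) []).length : Int) then
              PySem.List.pyGetD (PySem.List.pyGetD input_grid (k : Int) []) j 0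
            else 0)
        else List.replicate w.toNat 0) := by
      rw [List.getElem_map]
      congr 1 <;> rw [PySem.List.getElem_pyRange_one] <;> simp
    rw [hR, hZk]
    have hm : ((k : Int) ∈ PySem.List.pyRange 0 (min ((input_grid.length : Int)) h) 1) ↔
        ((k : Int) < (input_grid.length : Int)) := by
      rw [PySem.List.mem_pyRange_one]
      omega
    by_cases hlt : (k : Int) < (input_grid.length : Int)
    · rw [if_pos (hm.mpr hlt), if_pos hlt, pvProc_zero]
    · rw [if_neg (fun hc => hlt (hm.mp hc)), if_neg hlt]
      have : ((PySem.List.pyRange 0 w 1).map (fun _ => (0 : Int))) =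
          List.replicate ((PySem.List.pyRange 0 w 1).length) (0 : Int) := List.map_const'
      rw [this]
      simp

-- ===== VERDICT (by name: the statement is the Claim_ definition above) =====
theorem appliquer_remplissage_zone_spec : Claim_equal_appliquer_remplissage_zone := by
  intro g td _
  exact appliquer_remplissage_zone_equiv g td
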